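-- pv_equiv track=rewrite | github.com/OnewayYoun/algorithm-ps | 기타/사다리 타기.py | simulate_ladder
-- ===== SOURCE A (Python) =====
-- from typing import List, Tuple
-- from collections import defaultdict
--
-- def simulate_ladder(ladder: List[Tuple[int, int]], columns: int) -> defaultdict[int]:
--     result = defaultdict(int)
--     for column in range(1, columns + 1):
--         current = column
--         for bridge in ladder:
--             if current not in bridge:
--                 continue
--             if current == bridge[0]:
--                 current = bridge[1]
--             else:
--                 current = bridge[0]
--         result[column] = current
--     return result
-- ===== SOURCE B (Python) =====
-- from collections import defaultdict
--
-- def simulate_ladder(ladder, columns):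
--     # Apply each bridge as one transposition on a lazily-identity permutation:
--     # f maps a start column to its current position, inv is f's inverse.
--     f = {}
--     inv = {}
--     for a, b in ladder:
--         x = inv.get(a, a)
--         y = inv.get(b, b)
--         f[x] = b
--         f[y] = a
--         inv[b] = x
--         inv[a] = y
--     result = defaultdict(int)
--     for column in range(1, columns + 1):
--         result[column] = f.get(column, column)
--     return result
-- ===== Notes on version B (the rewrite author's own statement) =====
-- stated objective: faster
-- what changed: Instead of re-walking the whole bridge list for every column, B builds the composed permutation once by applying each bridge as a single transposition on a pair of forward/inverse dicts, then reads each column off in O(1).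
import Mathlib
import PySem

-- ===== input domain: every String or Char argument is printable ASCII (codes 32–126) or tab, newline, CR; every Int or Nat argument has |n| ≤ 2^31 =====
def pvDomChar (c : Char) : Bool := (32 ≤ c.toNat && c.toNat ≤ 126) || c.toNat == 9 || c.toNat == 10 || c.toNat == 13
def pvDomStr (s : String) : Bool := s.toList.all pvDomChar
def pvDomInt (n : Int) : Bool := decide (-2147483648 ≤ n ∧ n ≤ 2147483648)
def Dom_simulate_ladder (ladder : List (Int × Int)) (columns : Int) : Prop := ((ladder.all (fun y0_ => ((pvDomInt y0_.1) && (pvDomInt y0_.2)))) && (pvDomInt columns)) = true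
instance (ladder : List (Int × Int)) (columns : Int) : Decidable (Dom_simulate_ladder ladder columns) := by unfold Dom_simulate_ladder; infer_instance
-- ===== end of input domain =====

-- B builds the composed permutation once (one transposition per bridge on forward/inverse dicts)
-- instead of re-walking every bridge for every column: O(columns+bridges) vs O(columns*bridges).

-- ===== PORT A =====
-- inner loop body of A: one bridge applied to `current`
def ladderStep (cur : Int) (br : Int × Int) : Int :=
  if ¬(cur = br.1 ∨ cur = br.2) then cur
  else if cur = br.1 then br.2 else br.1

def simulate_ladder (ladder : List (Int × Int)) (columns : Int) : List (Int × Int) :=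
  ((PySem.List.pyRange 1 (columns + 1) 1).foldl
      (fun result column => result.insert column (ladder.foldl ladderStep column))
      PySem.Dict.empty).items

-- ===== PORT B =====
-- one bridge applied to the (forward, inverse) permutation dicts
def bridgeStep (st : PySem.Dict Int Int × PySem.Dict Int Int) (br : Int × Int) :
    PySem.Dict Int Int × PySem.Dict Int Int :=
  let x := st.2.getD br.1 br.1
  let y := st.2.getD br.2 br.2
  ((st.1.insert x br.2).insert y br.1, (st.2.insert br.2 x).insert br.1 y)

def simulate_ladder_alt (ladder : List (Int × Int)) (columns : Int) : List (Int × Int) :=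
  let st := ladder.foldl bridgeStep (PySem.Dict.empty, PySem.Dict.empty)
  (PySem.List.pyRange 1 (columns + 1) 1).map (fun column => (column, st.1.getD column column))

-- ===== PRECONDITION & SPEC =====
def Spec_simulate_ladder (ladder : List (Int × Int)) (columns : Int) (out : List (Int × Int)) : Prop := out = simulate_ladder_alt ladder columns
instance (ladder : List (Int × Int)) (columns : Int) (out : List (Int × Int)) : Decidable (Spec_simulate_ladder ladder columns out) := by unfold Spec_simulate_ladder; infer_instance

-- ===== CLAIM (what is proved, stated in full; the proofs are below) =====
def Claim_equal_simulate_ladder : Prop := ∀ (ladder : List (Int × Int)) (columns : Int), Dom_simulate_ladder ladder columns → Spec_simulate_ladder ladder columns (simulate_ladder ladder columns)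

-- ===== LEMMAS AND PROOFS =====

-- invariant: f realises G, inv realises G⁻¹, and G is injective
def LadderInv (f inv : PySem.Dict Int Int) (G : Int → Int) : Prop :=
  (∀ v, f.getD v v = G v) ∧ (∀ w, G (inv.getD w w) = w) ∧ Function.Injective G

theorem bridgeStep_inv (f inv : PySem.Dict Int Int) (G : Int → Int) (br : Int × Int)
    (h : LadderInv f inv G) :
    LadderInv (bridgeStep (f, inv) br).1 (bridgeStep (f, inv) br).2
      (fun v => ladderStep (G v) br) := by
  obtain ⟨hf, hinv, hG⟩ := h
  obtain ⟨a, b⟩ := br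
  have hx : G (inv.getD a a) = a := hinv a
  have hy : G (inv.getD b b) = b := hinv b
  refine ⟨?_, ?_, ?_⟩
  · intro v
    have hgv : (bridgeStep (f, inv) (a, b)).1.getD v v
        = if v = inv.getD b b then a else if v = inv.getD a a then b else G v := by
      simp [bridgeStep, PySem.Dict.getD_insert, hf v]
    rw [hgv]
    by_cases hvy : v = inv.getD b b
    · rw [if_pos hvy]
      show a = ladderStep (G v) (a, b)
      rw [hvy, hy]; unfold ladderStep; split_ifs <;> omega
    · rw [if_neg hvy]
      by_cases hvx : v = inv.getD a a
      · rw [if_pos hvx]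
        show b = ladderStep (G v) (a, b)
        rw [hvx, hx]; unfold ladderStep; split_ifs <;> omega
      · rw [if_neg hvx]
        have ha : ¬ G v = a := fun h => hvx (hG (h.trans hx.symm))
        have hb : ¬ G v = b := fun h => hvy (hG (h.trans hy.symm))
        show G v = ladderStep (G v) (a, b)
        unfold ladderStep; split_ifs <;> omega
  · intro w
    have hgw : (bridgeStep (f, inv) (a, b)).2.getD w w
        = if w = a then inv.getD b b else if w = b then inv.getD a a else inv.getD w w := by
      simp [bridgeStep, PySem.Dict.getD_insert]
    show ladderStep (G _) (a, b) = w
    rw [hgw]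
    by_cases hwa : w = a
    · subst hwa; rw [if_pos rfl, hy]; unfold ladderStep; split_ifs <;> omega
    · rw [if_neg hwa]
      by_cases hwb : w = b
      · subst hwb; rw [if_pos rfl, hx]; unfold ladderStep; split_ifs <;> omega
      · rw [if_neg hwb, hinv w]; unfold ladderStep; split_ifs <;> omega
  · intro v1 v2 hv
    simp only [ladderStep] at hv
    apply hG
    split_ifs at hv <;> omega

theorem foldl_bridgeStep_inv (ladder : List (Int × Int)) (f inv : PySem.Dict Int Int)
    (G : Int → Int) (h : LadderInv f inv G) :
    LadderInv (ladder.foldl bridgeStep (f, inv)).1 (ladder.foldl bridgeStep (f, inv)).2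
      (fun v => ladder.foldl ladderStep (G v)) := by
  induction ladder generalizing f inv G with
  | nil => simpa using h
  | cons br rest ih =>
    have := ih (bridgeStep (f, inv) br).1 (bridgeStep (f, inv) br).2
      (fun v => ladderStep (G v) br) (bridgeStep_inv f inv G br h)
    simpa using this

theorem final_getD (ladder : List (Int × Int)) (c : Int) :
    (ladder.foldl bridgeStep (PySem.Dict.empty, PySem.Dict.empty)).1.getD c c
      = ladder.foldl ladderStep c := by
  have h0 : LadderInv PySem.Dict.empty PySem.Dict.empty (fun v => v) :=
    ⟨fun v => PySem.Dict.getD_empty .., fun w => PySem.Dict.getD_empty .., fun _ _ h => h⟩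
  exact (foldl_bridgeStep_inv ladder _ _ _ h0).1 c

-- ===== VERDICT (by name: the statement is the Claim_ definition above) =====
theorem simulate_ladder_spec : Claim_equal_simulate_ladder := by
  intro ladder columns _
  unfold Spec_simulate_ladder simulate_ladder simulate_ladder_alt
  rw [PySem.Dict.items_foldl_insert_fresh _ _ _ _
        (fun a _ => PySem.Dict.contains_empty a)
        (by simpa using PySem.List.nodup_pyRange_one 1 (columns + 1))]
  rw [show (PySem.Dict.empty : PySem.Dict Int Int).items = [] from rfl, List.nil_append]
  exact List.map_congr_left (fun c _ => by rw [final_getD])
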